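-- pv_equiv track=rewrite | github.com/ycv005/getnote | note/views.py | tagsInDic
-- ===== SOURCE A (Python) =====
-- def tagsInDic(tags):
--     """Convert comma separated tags into dictionary"""
--     last_ind = 0
--     res = {}
--     for i, c in enumerate(tags):
--         if c == ',':
--             res[tags[last_ind:i]] = 1
--             last_ind = i + 1
--     res[tags[last_ind:]] = 1
--     return res
-- ===== SOURCE B (Python) =====
-- def tagsInDic(tags):
--     """Convert comma separated tags into dictionary"""
--     return {t: 1 for t in tags.split(',')}
-- ===== Notes on version B (the rewrite author's own statement) =====
-- stated objective: idiomatic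
-- what changed: Replaced the manual character scan tracking a last-delimiter index and taking slices with a single str.split on the comma separator followed by a dict comprehension mapping each token to 1.
import Mathlib
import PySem

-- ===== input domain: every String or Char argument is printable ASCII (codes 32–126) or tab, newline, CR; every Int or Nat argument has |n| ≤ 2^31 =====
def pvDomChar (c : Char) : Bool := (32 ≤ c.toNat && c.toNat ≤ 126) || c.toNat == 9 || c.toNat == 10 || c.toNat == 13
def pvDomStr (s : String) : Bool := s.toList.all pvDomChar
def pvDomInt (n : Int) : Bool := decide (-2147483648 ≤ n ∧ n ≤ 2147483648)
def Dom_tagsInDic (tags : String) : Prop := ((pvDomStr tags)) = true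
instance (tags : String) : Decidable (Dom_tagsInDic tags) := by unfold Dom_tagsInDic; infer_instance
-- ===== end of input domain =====

-- B replaces A's manual character scan (last-delimiter index + slices) with str.split(',')
-- and a dict comprehension; equivalence of the return value is proved for every string.

-- ===== PORT A =====
-- literal transliteration: a dict `res`, a running int `last_ind`, a loop over enumerate(tags)
-- that on each ',' inserts the slice tags[last_ind:i] and advances last_ind, then a final
-- insert of tags[last_ind:]; the returned dict is its items list (insertion order).
def tagsInDic (tags : String) : List (String × Int) :=
  let st := (PySem.List.enumerate tags.toList 0).foldl
    (fun (st : Int × PySem.Dict String Int) p =>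
      if p.2 = ',' then
        (p.1 + 1, st.2.insert (PySem.Str.slice tags (some st.1) (some p.1)) 1)
      else st)
    ((0 : Int), PySem.Dict.empty)
  (st.2.insert (PySem.Str.slice tags (some st.1) none) 1).items

-- ===== PORT B =====
-- literal transliteration of Source B: tokens = tags.split(','), then {t: 1 for t in tokens}.
-- (split? returns some for the non-empty separator ","; getD [] only totalizes it.)
def tagsInDic_alt (tags : String) : List (String × Int) :=
  (((PySem.Str.split? tags ",").getD []).foldl
    (fun (d : PySem.Dict String Int) t => d.insert t 1) PySem.Dict.empty).items

-- ===== PRECONDITION & SPEC =====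
def Spec_tagsInDic (tags : String) (out : List (String × Int)) : Prop := out = tagsInDic_alt tags
instance (tags : String) (out : List (String × Int)) : Decidable (Spec_tagsInDic tags out) := by unfold Spec_tagsInDic; infer_instance

-- ===== CLAIM (what is proved, stated in full; the proofs are below) =====
def Claim_equal_tagsInDic : Prop := ∀ (tags : String), Dom_tagsInDic tags → Spec_tagsInDic tags (tagsInDic tags)

-- ===== LEMMAS AND PROOFS =====

-- A simple structural recursion computing Python's s.split(c) for a one-char separator;
-- the proof bridge between A's index scan and PySem's fuel-based splitOn.
def splitC (c : Char) : List Char → List (List Char)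
  | [] => [[]]
  | x :: rest => if x = c then [] :: splitC c rest else (splitC c rest).modifyHead (x :: ·)

lemma splitOn_go_eq (c : Char) :
    ∀ (l : List Char) (fuel : Nat) (cur : List Char) (acc : List (List Char)),
      l.length < fuel →
      PySem.Chars.splitOn.go [c] fuel l cur acc
        = acc.reverse ++ (splitC c l).modifyHead (cur.reverse ++ ·) := by
  intro l
  induction l with
  | nil =>
    intro fuel cur acc h
    match fuel, h with
    | fuel + 1, _ => simp [PySem.Chars.splitOn.go, splitC]
  | cons x rest ih =>
    intro fuel cur acc h
    match fuel, h with
    | fuel + 1, h =>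
      by_cases hx : x = c
      · subst hx
        have hpre : [x].isPrefixOf (x :: rest) = true := by simp [List.isPrefixOf]
        simp only [PySem.Chars.splitOn.go, hpre, if_true, List.length_cons,
          List.length_nil, List.drop_succ_cons, List.drop_zero]
        rw [ih fuel [] (cur.reverse :: acc) (by simpa using Nat.lt_of_succ_lt_succ h)]
        simp only [splitC, List.reverse_cons, List.append_assoc, List.singleton_append,
          List.reverse_nil, List.nil_append]
        cases hs : splitC x rest <;> simp [List.modifyHead]
      · have hpre : [c].isPrefixOf (x :: rest) = false := by
          simp [List.isPrefixOf]; exact fun hc => absurd hc.symm hx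
        simp only [PySem.Chars.splitOn.go, hpre, Bool.false_eq_true, if_false]
        rw [ih fuel (x :: cur) acc (by simpa using Nat.lt_of_succ_lt_succ h)]
        simp only [splitC, hx, if_false, List.modifyHead_modifyHead]
        congr 2
        funext h'
        simp

lemma splitOn_eq_splitC (c : Char) (l : List Char) :
    PySem.Chars.splitOn l [c] = splitC c l := by
  unfold PySem.Chars.splitOn
  rw [splitOn_go_eq c l (l.length + 1) [] [] (by omega)]
  cases hs : splitC c l <;> simp [List.modifyHead]

lemma splitC_of_not_mem {c : Char} {l : List Char} (h : c ∉ l) : splitC c l = [l] := by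
  induction l with
  | nil => simp [splitC]
  | cons x rest ih =>
    simp only [List.mem_cons, not_or] at h
    simp [splitC, Ne.symm h.1, ih h.2]

lemma splitC_append_cons {c : Char} {w rest : List Char} (h : c ∉ w) :
    splitC c (w ++ c :: rest) = w :: splitC c rest := by
  induction w with
  | nil => simp [splitC]
  | cons x w' ih =>
    simp only [List.mem_cons, not_or] at h
    simp only [List.cons_append, splitC, Ne.symm h.1, if_false, ih h.2]
    cases hs : splitC c rest <;> simp [List.modifyHead]

-- the invariant of A's scan: with the suffix s = t.drop k still to process, the current token
-- start ln, and no comma between ln and k, finishing the loop and doing the final insert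
-- equals folding the insert over splitC of the remaining tail t.drop ln.
lemma scan_invariant (t : List Char) :
    ∀ (s : List Char) (k ln : Nat) (d : PySem.Dict String Int),
      t.drop k = s → ln ≤ k → ',' ∉ (t.drop ln).take (k - ln) →
      ((PySem.List.enumerate s (k : Int)).foldl
        (fun (st : Int × PySem.Dict String Int) p =>
          if p.2 = ',' then
            (p.1 + 1, st.2.insert (String.ofList (PySem.List.slice t (some st.1) (some p.1))) 1)
          else st) ((ln : Int), d)).2.insert
        (String.ofList (PySem.List.slice t
          (some ((PySem.List.enumerate s (k : Int)).foldl
            (fun (st : Int × PySem.Dict String Int) p =>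
              if p.2 = ',' then
                (p.1 + 1, st.2.insert (String.ofList (PySem.List.slice t (some st.1) (some p.1))) 1)
              else st) ((ln : Int), d)).1) none)) 1
      = (splitC ',' (t.drop ln)).foldl
          (fun (d : PySem.Dict String Int) w => d.insert (String.ofList w) 1) d := by
  intro s
  induction s with
  | nil =>
    intro k ln d hdrop hle hcomma
    have hnc : ',' ∉ t.drop ln := by
      have hdl : t.drop ln = (t.drop ln).take (k - ln) := by
        conv_lhs => rw [← List.take_append_drop (k - ln) (t.drop ln)]
        rw [List.drop_drop, show ln + (k - ln) = k by omega, hdrop]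
        simp
      rw [hdl]; exact hcomma
    simp only [PySem.List.enumerate_nil, List.foldl_nil]
    rw [splitC_of_not_mem hnc]
    simp [PySem.List.slice_from_natCast]
  | cons ch s' ih =>
    intro k ln d hdrop hle hcomma
    have hk : k < t.length := by
      by_contra hlen
      rw [List.drop_eq_nil_of_le (by omega)] at hdrop
      exact List.cons_ne_nil ch s' hdrop.symm
    have hdrop' : t.drop (k + 1) = s' := by
      have h1 : t.drop (k + 1) = (t.drop k).drop 1 := by rw [List.drop_drop]
      rw [h1, hdrop]; simp
    have hdecomp : t.drop ln = (t.drop ln).take (k - ln) ++ ch :: s' := by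
      conv_lhs => rw [← List.take_append_drop (k - ln) (t.drop ln)]
      rw [List.drop_drop, show ln + (k - ln) = k by omega, hdrop]
    have hlenw : ((t.drop ln).take (k - ln)).length = k - ln := by
      rw [List.length_take, List.length_drop]; omega
    have htake_succ : (t.drop ln).take (k + 1 - ln) = (t.drop ln).take (k - ln) ++ [ch] := by
      conv_lhs => rw [hdecomp]
      rw [List.take_append, hlenw,
        show k + 1 - ln - (k - ln) = 1 by omega, List.take_take,
        show min (k + 1 - ln) (k - ln) = k - ln by omega]
      simp
    have hstep : ((k : Int) + 1) = ((k + 1 : Nat) : Int) := by push_cast; ring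
    rw [PySem.List.enumerate_cons]
    by_cases hch : ch = ','
    · subst hch
      simp only [List.foldl_cons, reduceIte, hstep]
      rw [ih (k + 1) (k + 1)
        (d.insert (String.ofList (PySem.List.slice t (some (ln : Int)) (some (k : Int)))) 1)
        hdrop' (le_refl _) (by simp)]
      conv_rhs => rw [hdecomp, splitC_append_cons hcomma]
      rw [List.foldl_cons, hdrop', PySem.List.slice_natCast]
    · simp only [List.foldl_cons, reduceIte, hch, hstep]
      rw [ih (k + 1) ln d hdrop' (by omega)
        (by rw [htake_succ]; simp only [List.mem_append, List.mem_singleton]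
            exact fun h => h.elim hcomma (fun h => hch h.symm))]

-- ===== VERDICT (by name: the statement is the Claim_ definition above) =====
theorem tagsInDic_spec : Claim_equal_tagsInDic := by
  intro tags _
  unfold Spec_tagsInDic tagsInDic tagsInDic_alt
  have hsplit : (PySem.Str.split? tags ",").getD []
      = (splitC ',' tags.toList).map String.ofList := by
    unfold PySem.Str.split?
    rw [show (",".toList : List Char) = [','] from rfl]
    unfold PySem.Chars.split?
    simp [splitOn_eq_splitC]
  rw [hsplit, List.foldl_map]
  simp only [PySem.Str.slice, PySem.Chars.slice_eq_listSlice]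
  have := scan_invariant tags.toList tags.toList 0 0 PySem.Dict.empty (by simp) (le_refl _)
    (by simp)
  simp only [List.drop_zero, Int.natCast_zero] at this
  rw [this]
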